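-- pv_equiv track=rewrite | github.com/AmericanoBoy/OOP_PRACTICES | ALGORITMES_MODUL_5_HW_2/shift_array_and_reverse.py | shift_array_left_and_reverse
-- ===== SOURCE A (Python) =====
-- def control_input_data(array,shift_flag):
--     if not isinstance(array, list): raise TypeError('ИТЕРИРУЕМЫМ ОБЪЕКТОМ ДОЛЖЕН БЫТЬ СПИСКОМ !')
--     if len(array) == 0: raise ValueError('ВХОДНОЙ СПИСОК  НЕ ДОЛЖЕН БЫТЬ ПУСТЫМ !')
--     if not isinstance(shift_flag, int): raise TypeError('ГРАНИЦА СДВИГА ДОЛЖНА БЫТЬ ЦЕЛЫМ ЧИСЛОМ !')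
--     if shift_flag > len(array) or shift_flag < 0: raise ValueError('ДИАПАЗОНЫ ПОИСКА ДОЛЖНЫ БЫТЬ ДОПУСТИМЫМИ !')
--
-- def shift_array_left_and_reverse(array, shift_flag):
--     '''
--     функция, cдвигающая список 'array' на 'shift_flag' позиций влево,
--     а затем инверсирует полученный список
--     :param array, shift_flag: [1,2,3,4,5,6,7,8], 3
--     :return: [3,2,1,8,7,6,5,4]
--     примечание: сложность алгоритма Оn. Прицип алгоритма основан не на
--     'cначала сдвиге влево' а потом инверсии....
--     Алгоритм максимально упрощен: инверсируются между собой элементы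
--     до 'shift_flag' и после 'shift_flag'
--     '''
--
--     control_input_data(array, shift_flag) #проверяем допустимость входных данных
--     len_array = len(array) #длина списка
--     half_shift_flag_and_len_array = int((len_array-shift_flag)/2) #'точка инверсии' сдвига первой части списка
--     limit_cycle_range = len_array - half_shift_flag_and_len_array #лимит итераций цикла 'range'
--     count = 0
--     for i in range(limit_cycle_range):
--         if i < int(shift_flag/2):
--             temp_variable = array[i]
--             array[i] = array[shift_flag-i-1]
--             array[shift_flag-i-1] = temp_variable
--         if i >= shift_flag:
--             count += 1
--             temp_variable = array[i]
--             array[i] = array[len_array-count]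
--             array[len_array-count] = temp_variable
--
--     return array
-- ===== SOURCE B (Python) =====
-- # B: same validation, then the documented equivalent computed by slicing:
-- # left-rotate via slices and reverse the whole result, assigned back in place
-- # (mutates `array` in place like A; the proved equivalence is about the return value).
-- def control_input_data(array, shift_flag):
--     if not isinstance(array, list): raise TypeError('ИТЕРИРУЕМЫМ ОБЪЕКТОМ ДОЛЖЕН БЫТЬ СПИСКОМ !')
--     if len(array) == 0: raise ValueError('ВХОДНОЙ СПИСОК  НЕ ДОЛЖЕН БЫТЬ ПУСТЫМ !')
--     if not isinstance(shift_flag, int): raise TypeError('ГРАНИЦА СДВИГА ДОЛЖНА БЫТЬ ЦЕЛЫМ ЧИСЛОМ !')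
--     if shift_flag > len(array) or shift_flag < 0: raise ValueError('ДИАПАЗОНЫ ПОИСКА ДОЛЖНЫ БЫТЬ ДОПУСТИМЫМИ !')
--
-- def shift_array_left_and_reverse(array, shift_flag):
--     control_input_data(array, shift_flag)
--     rotated = array[shift_flag:] + array[:shift_flag]
--     array[:] = rotated[::-1]
--     return array
-- ===== Notes on version B (the rewrite author's own statement) =====
-- stated objective: simpler
-- what changed: B replaces the index-arithmetic swap loop that reverses the two sub-segments in place by the documented formulation: left-rotate with two slices and reverse the whole list.
import Mathlib
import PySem

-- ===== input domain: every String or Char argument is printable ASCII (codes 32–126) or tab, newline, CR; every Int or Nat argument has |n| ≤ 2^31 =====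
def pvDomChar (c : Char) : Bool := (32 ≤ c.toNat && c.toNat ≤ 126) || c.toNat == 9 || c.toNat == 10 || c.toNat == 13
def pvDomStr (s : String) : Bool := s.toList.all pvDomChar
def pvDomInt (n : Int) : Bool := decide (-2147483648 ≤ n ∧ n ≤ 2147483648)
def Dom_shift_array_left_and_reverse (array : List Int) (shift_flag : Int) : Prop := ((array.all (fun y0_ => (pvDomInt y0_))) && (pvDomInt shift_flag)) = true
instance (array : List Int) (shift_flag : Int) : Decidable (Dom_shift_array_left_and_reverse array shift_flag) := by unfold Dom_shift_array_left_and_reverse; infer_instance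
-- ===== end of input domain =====

-- B replaces A's in-place two-segment swap loop by "rotate with two slices, then reverse the whole
-- list" (both Pythons mutate `array` in place; the equivalence proved is about the return value).

-- ===== PORT A =====
-- loop body of A's `for i in range(limit_cycle_range)`, state = (array, count).
-- `pyGetD … 0` / `.toNat` stand for Python indexing: under Pre_ every index the loop uses is ≥ 0 and
-- in range, so they are exact there (outside Pre_ the Python raises in control_input_data before the loop).
def pvStepA (lenArray shift_flag : Int) (st : List Int × Int) (i : Int) : List Int × Int :=
  let a := st.1
  let count := st.2
  let a1 :=
    if i < PySem.Int.truncdiv shift_flag 2 then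
      let t := PySem.List.pyGetD a i 0
      let a' := a.set i.toNat (PySem.List.pyGetD a (shift_flag - i - 1) 0)
      a'.set (shift_flag - i - 1).toNat t
    else a
  if shift_flag ≤ i then
    let count' := count + 1
    let t := PySem.List.pyGetD a1 i 0
    let a2 := a1.set i.toNat (PySem.List.pyGetD a1 (lenArray - count') 0)
    (a2.set (lenArray - count').toNat t, count')
  else (a1, count)

def shift_array_left_and_reverse (array : List Int) (shift_flag : Int) : List Int :=
  let lenArray : Int := (array.length : Int)
  -- int((len_array-shift_flag)/2): truncating division, exact on Dom (|values| ≤ 2^31 < 2^53)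
  let half := PySem.Int.truncdiv (lenArray - shift_flag) 2
  let limit := lenArray - half
  ((PySem.List.pyRange 0 limit 1).foldl (pvStepA lenArray shift_flag) (array, 0)).1

-- ===== PORT B =====
def shift_array_left_and_reverse_alt (array : List Int) (shift_flag : Int) : List Int :=
  let rotated := PySem.List.slice array (some shift_flag) none ++ PySem.List.slice array none (some shift_flag)
  -- rotated[::-1]; the step -1 is nonzero, so slice? is always `some`
  (PySem.List.slice? rotated none none (-1)).getD []

-- ===== PRECONDITION & SPEC =====
-- exactly where control_input_data does not raise: nonempty list, 0 ≤ shift_flag ≤ len(array)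
def Pre_shift_array_left_and_reverse (array : List Int) (shift_flag : Int) : Prop :=
  array ≠ [] ∧ 0 ≤ shift_flag ∧ shift_flag ≤ (array.length : Int)
instance (array : List Int) (shift_flag : Int) : Decidable (Pre_shift_array_left_and_reverse array shift_flag) := by unfold Pre_shift_array_left_and_reverse; infer_instance
def pvWitness_shift_array_left_and_reverse : List Int × Int := ([1, 2, 3, 4, 5, 6, 7, 8], 3)

def Spec_shift_array_left_and_reverse (array : List Int) (shift_flag : Int) (out : List Int) : Prop := out = shift_array_left_and_reverse_alt array shift_flag
instance (array : List Int) (shift_flag : Int) (out : List Int) : Decidable (Spec_shift_array_left_and_reverse array shift_flag out) := by unfold Spec_shift_array_left_and_reverse; infer_instance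

-- ===== CLAIM (what is proved, stated in full; the proofs are below) =====
def Claim_equal_shift_array_left_and_reverse : Prop := ∀ (array : List Int) (shift_flag : Int), Dom_shift_array_left_and_reverse array shift_flag → Pre_shift_array_left_and_reverse array shift_flag → Spec_shift_array_left_and_reverse array shift_flag (shift_array_left_and_reverse array shift_flag)

-- ===== LEMMAS AND PROOFS =====

-- a single Python swap `array[p], array[q] = array[q], array[p]` on Nat indices
def pvSwp (l : List Int) (p q : Nat) : List Int := (l.set p (l.getD q 0)).set q (l.getD p 0)

theorem pvSwp_length (l : List Int) (p q : Nat) : (pvSwp l p q).length = l.length := by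
  simp [pvSwp]

theorem pvSwp_self (l : List Int) (a : Nat) (h : a < l.length) : pvSwp l a a = l := by
  simp [pvSwp, List.getElem?_eq_getElem h]

theorem pvSwp_eq (l : List Int) (p q : Nat) (hp : p < l.length) (hq : q < l.length) :
    pvSwp l p q = (l.set p l[q]).set q l[p] := by
  simp [pvSwp, List.getD_eq_getElem?_getD, List.getElem?_eq_getElem hp, List.getElem?_eq_getElem hq]

theorem seg_split (l : List Int) (a : Nat) (h : a < l.length) :
    l.take a ++ l[a] :: l.drop (a + 1) = l := by
  conv_rhs => rw [← List.take_append_drop a l, List.drop_eq_getElem_cons h]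

theorem pv_truncdiv_two (a : Int) (h : 0 ≤ a) :
    PySem.Int.truncdiv a 2 = ((a.toNat / 2 : Nat) : Int) := by
  simp [PySem.Int.truncdiv, Int.tdiv_eq_ediv_of_nonneg h]; omega

-- a fold whose every step is the identity
theorem pv_foldl_id {α β : Type} (l : List β) (f : α → β → α) (init : α)
    (h : ∀ acc x, x ∈ l → f acc x = acc) : l.foldl f init = init := by
  induction l generalizing init with
  | nil => rfl
  | cons x xs ih =>
    simp only [List.foldl_cons, h init x (by simp)]
    exact ih init (fun acc y hy => h acc y (by simp [hy]))

-- a fold that never touches the second component of the pair state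
theorem pv_foldl_fst {β : Type} (xs : List β) (u : List Int → β → List Int) (l : List Int) (c : Int) :
    xs.foldl (fun st j => (u st.1 j, st.2)) (l, c) = (xs.foldl u l, c) := by
  induction xs generalizing l with
  | nil => rfl
  | cons x t ih => simpa using ih (u l x)

-- an Int-range fold is a Nat-range fold
theorem pv_foldl_pyRange_range {α : Type} (F : α → Int → α) (a b : Int) (k : Nat)
    (hb : b = a + k) (init : α) :
    (PySem.List.pyRange a b 1).foldl F init
      = (List.range k).foldl (fun st (j : Nat) => F st (a + (j : Int))) init := by
  subst hb
  rw [PySem.List.pyRange_one]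
  have h : (a + (k : Int) - a).toNat = k := by omega
  rw [h]
  exact List.foldl_map

theorem pv_foldl_range_congr {α : Type} (k : Nat) (f g : α → Nat → α) (init : α)
    (h : ∀ acc j, j < k → f acc j = g acc j) :
    (List.range k).foldl f init = (List.range k).foldl g init := by
  induction k with
  | zero => rfl
  | succ k ih =>
    rw [List.range_succ, List.foldl_append, List.foldl_append,
      ih (fun acc j hj => h acc j (by omega))]
    simp [h _ k (by omega)]

-- the two-pointer swap loop reverses the segment [a, a+m) (k = ⌊m/2⌋ or ⌈m/2⌉ swaps)
theorem pv_revSeg : ∀ (m k a : Nat) (l : List Int), a + m ≤ l.length → m / 2 ≤ k → 2 * k ≤ m + 1 →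
    (List.range k).foldl (fun l j => pvSwp l (a + j) (a + m - 1 - j)) l
      = l.take a ++ ((l.drop a).take m).reverse ++ l.drop (a + m) := by
  intro m
  induction m using Nat.strong_induction_on with
  | _ m ih =>
  match m with
  | 0 =>
    intro k a l hlen hk1 hk2
    have hk : k = 0 := by omega
    subst hk
    simp
  | 1 =>
    intro k a l hlen hk1 hk2
    have ha : a < l.length := by omega
    have hone : l.take a ++ ((l.drop a).take 1).reverse ++ l.drop (a + 1) = l := by
      rw [List.drop_eq_getElem_cons ha]
      simp only [List.take_succ_cons, List.take_zero, List.reverse_cons, List.reverse_nil,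
        List.nil_append, List.append_assoc, List.singleton_append]
      exact seg_split l a ha
    match k with
    | 0 => simpa using hone.symm
    | 1 =>
      simp only [List.range_one, List.foldl_cons, List.foldl_nil, Nat.add_zero]
      have h2 : a + 1 - 1 - 0 = a := by omega
      rw [h2, pvSwp_self l a ha]
      exact hone.symm
  | (m + 2) =>
    intro k a l hlen hk1 hk2
    match k, hk1 with
    | 0, h => exact absurd h (by omega)
    | (k' + 1), _ =>
    have hb : a + m + 1 < l.length := by omega
    have ha : a < l.length := by omega
    have hstep0 : a + (m + 2) - 1 - 0 = a + m + 1 := by omega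
    rw [List.range_succ_eq_map, List.foldl_cons, List.foldl_map]
    simp only [Nat.add_zero, hstep0]
    set l1 := pvSwp l a (a + m + 1) with hl1
    have hlen1 : l1.length = l.length := pvSwp_length l a (a + m + 1)
    have hfun : (fun (acc : List Int) (j : Nat) => pvSwp acc (a + j.succ) (a + (m + 2) - 1 - j.succ))
        = (fun acc j => pvSwp acc ((a + 1) + j) ((a + 1) + m - 1 - j)) := by
      funext acc j
      congr 1 <;> omega
    rw [hfun, ih m (by omega) k' (a + 1) l1 (by omega) (by omega) (by omega)]
    have hl1e : l1 = (l.set a l[a + m + 1]).set (a + m + 1) l[a] := pvSwp_eq l a (a + m + 1) ha hb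
    have c1 : l1.take (a + 1) = l.take a ++ [l[a + m + 1]] := by
      rw [hl1e, List.take_set_of_le (by omega), List.take_set]
      rw [List.take_add_one, List.getElem?_eq_getElem ha]
      rw [List.set_append]
      simp [Nat.min_eq_left (Nat.le_of_lt ha)]
    have c2 : (l1.drop (a + 1)).take m = (l.drop (a + 1)).take m := by
      rw [hl1e, List.drop_set]
      simp only [show ¬(a + m + 1 < a + 1) from by omega, if_false]
      rw [List.drop_set_of_lt (show a < a + 1 by omega)]
      have : a + m + 1 - (a + 1) = m := by omega
      rw [this, List.take_set_of_le (by omega)]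
    have c3 : l1.drop (a + 1 + m) = l[a] :: l.drop (a + m + 2) := by
      rw [hl1e, List.drop_set]
      simp only [show ¬(a + m + 1 < a + 1 + m) from by omega, if_false]
      rw [List.drop_set_of_lt (show a < a + 1 + m by omega)]
      have h1 : a + 1 + m = a + m + 1 := by omega
      rw [h1, List.drop_eq_getElem_cons hb]
      have h2 : a + m + 1 - (a + m + 1) = 0 := by omega
      rw [h2]
      rfl
    have c4 : (l.drop a).take (m + 2) = l[a] :: ((l.drop (a + 1)).take m ++ [l[a + m + 1]]) := by
      rw [List.drop_eq_getElem_cons ha, List.take_succ_cons, List.take_add_one,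
        List.getElem?_drop]
      have : a + 1 + m = a + m + 1 := by omega
      rw [this, List.getElem?_eq_getElem hb]
      rfl
    rw [c1, c2, c3, c4]
    have h5 : a + (m + 2) = a + m + 2 := by omega
    rw [h5]
    simp [List.reverse_append, List.append_assoc]

-- phase 3 of A's loop (i ≥ shift_flag): `count` counts the steps, and each step swaps i with n-count
theorem pv_phase3 (n s : Int) (hs : 0 ≤ s) (hsn : s ≤ n) :
    ∀ (k j : Nat) (lo hi c : Int) (l : List Int),
      lo = s + j → hi = s + j + k → c = (j : Int) → (j : Int) + k ≤ n - s →
      (PySem.List.pyRange lo hi 1).foldl (pvStepA n s) (l, c)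
        = ((List.range k).foldl (fun l t => pvSwp l (s.toNat + (j + t)) (n.toNat - 1 - (j + t))) l,
            (j : Int) + k) := by
  intro k
  induction k with
  | zero =>
    intro j lo hi c l hlo hhi hc hk
    rw [PySem.List.pyRange_one_eq_nil (by omega)]
    simp [hc]
  | succ k ih =>
    intro j lo hi c l hlo hhi hc hk
    rw [PySem.List.pyRange_one_cons (by omega), List.foldl_cons]
    have htd : PySem.Int.truncdiv s 2 = ((s.toNat / 2 : Nat) : Int) := pv_truncdiv_two s hs
    have hc1 : ¬ (lo < PySem.Int.truncdiv s 2) := by rw [htd]; omega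
    have hc2 : s ≤ lo := by omega
    have hi0 : lo.toNat = s.toNat + j := by omega
    have hi1 : n - (c + 1) = ((n.toNat - 1 - j : Nat) : Int) := by omega
    have hstep : pvStepA n s (l, c) lo
        = (pvSwp l (s.toNat + j) (n.toNat - 1 - j), c + 1) := by
      simp only [pvStepA, if_neg hc1, if_pos hc2, hi1, hi0, pvSwp,
        PySem.List.pyGetD_of_nonneg _ _ (show (0:Int) ≤ lo by omega),
        PySem.List.pyGetD_of_nonneg _ _ (show (0:Int) ≤ ((n.toNat - 1 - j : Nat) : Int) by omega)]
      simp
    rw [hstep, ih (j + 1) (lo + 1) hi (c + 1) _ (by omega) (by omega) (by omega) (by omega)]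
    have hfun : (fun (l : List Int) (t : Nat) => pvSwp l (s.toNat + ((j + 1) + t)) (n.toNat - 1 - ((j + 1) + t)))
        = (fun l t => pvSwp l (s.toNat + (j + t.succ)) (n.toNat - 1 - (j + t.succ))) := by
      funext l t
      congr 1 <;> omega
    rw [hfun, List.range_succ_eq_map, List.foldl_cons, List.foldl_map]
    simp only [Nat.add_zero]
    congr 1
    push_cast
    ring

theorem shift_array_left_and_reverse_spec : Claim_equal_shift_array_left_and_reverse := by
  intro array s hdom hpre
  obtain ⟨hne, hs0, hsn⟩ := hpre
  have hlen0 : 0 < array.length := by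
    cases array with
    | nil => exact absurd rfl hne
    | cons x t => simp
  have hs'n : s.toNat ≤ array.length := by omega
  unfold Spec_shift_array_left_and_reverse
  -- B's value
  have hB : shift_array_left_and_reverse_alt array s
      = (array.take s.toNat).reverse ++ (array.drop s.toNat).reverse := by
    simp only [shift_array_left_and_reverse_alt]
    rw [PySem.List.slice?_none_none_neg_one, PySem.List.slice_from array hs0,
      PySem.List.slice_to array hs0]
    simp [List.reverse_append]
  rw [hB]
  -- A's value
  simp only [shift_array_left_and_reverse]
  have hlim : (array.length : Int) - PySem.Int.truncdiv ((array.length : Int) - s) 2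
      = ((array.length - (array.length - s.toNat) / 2 : Nat) : Int) := by
    rw [pv_truncdiv_two _ (by omega)]
    omega
  rw [hlim]
  rw [PySem.List.pyRange_one_append 0 ((s.toNat / 2 : Nat) : Int)
      ((array.length - (array.length - s.toNat) / 2 : Nat) : Int) (by omega) (by omega),
    PySem.List.pyRange_one_append ((s.toNat / 2 : Nat) : Int) s
      ((array.length - (array.length - s.toNat) / 2 : Nat) : Int) (by omega) (by omega),
    List.foldl_append, List.foldl_append]
  -- phase 1: i < shift_flag/2 — reverse the first segment
  rw [pv_foldl_pyRange_range (pvStepA (array.length : Int) s) 0 ((s.toNat / 2 : Nat) : Int)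
      (s.toNat / 2) (by omega) (array, 0)]
  rw [pv_foldl_range_congr (s.toNat / 2) _
      (fun (st : List Int × Int) (j : Nat) => (pvSwp st.1 j (s.toNat - 1 - j), st.2)) (array, 0)
      (by
        intro acc j hj
        have hc1 : (0 : Int) + (j : Int) < PySem.Int.truncdiv s 2 := by
          rw [pv_truncdiv_two s hs0]; omega
        have hc2 : ¬ (s ≤ (0 : Int) + (j : Int)) := by omega
        have he1 : ((0 : Int) + (j : Int)).toNat = j := by omega
        have he2 : s - ((0 : Int) + (j : Int)) - 1 = ((s.toNat - 1 - j : Nat) : Int) := by omega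
        simp only [pvStepA, if_pos hc1, if_neg hc2, he2, he1, pvSwp,
          PySem.List.pyGetD_of_nonneg _ _ (show (0 : Int) ≤ 0 + (j : Int) by omega),
          PySem.List.pyGetD_of_nonneg _ _
            (show (0 : Int) ≤ ((s.toNat - 1 - j : Nat) : Int) by omega)]
        simp)]
  rw [pv_foldl_fst (List.range (s.toNat / 2)) (fun l j => pvSwp l j (s.toNat - 1 - j)) array 0]
  have hfa : (fun (l : List Int) (j : Nat) => pvSwp l j (s.toNat - 1 - j))
      = (fun l j => pvSwp l (0 + j) (0 + s.toNat - 1 - j)) := by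
    funext l j
    congr 1 <;> omega
  rw [hfa, pv_revSeg s.toNat (s.toNat / 2) 0 array (by omega) (le_refl _) (by omega)]
  simp only [List.take_zero, List.drop_zero, List.nil_append, Nat.zero_add]
  -- phase 2: shift_flag/2 ≤ i < shift_flag — no-op iterations
  rw [pv_foldl_id (PySem.List.pyRange ((s.toNat / 2 : Nat) : Int) s 1) (pvStepA (array.length : Int) s) _
      (by
        intro acc x hx
        rw [PySem.List.mem_pyRange_one] at hx
        have hc1 : ¬ (x < PySem.Int.truncdiv s 2) := by
          rw [pv_truncdiv_two s hs0]; omega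
        have hc2 : ¬ (s ≤ x) := by omega
        simp [pvStepA, if_neg hc1, if_neg hc2])]
  -- phase 3: i ≥ shift_flag — reverse the tail segment
  rw [pv_phase3 (array.length : Int) s hs0 (by omega)
      (array.length - (array.length - s.toNat) / 2 - s.toNat) 0 s
      ((array.length - (array.length - s.toNat) / 2 : Nat) : Int) 0 _
      (by omega) (by omega) (by omega) (by omega)]
  have hl1 : ((array.take s.toNat).reverse ++ array.drop s.toNat).length = array.length := by
    simp
    omega
  have hfb : (fun (l : List Int) (t : Nat) =>
        pvSwp l (s.toNat + (0 + t)) ((array.length : Int).toNat - 1 - (0 + t)))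
      = (fun l t => pvSwp l (s.toNat + t) (s.toNat + (array.length - s.toNat) - 1 - t)) := by
    funext l t
    congr 1 <;> omega
  rw [hfb, pv_revSeg (array.length - s.toNat)
      (array.length - (array.length - s.toNat) / 2 - s.toNat) s.toNat _
      (by rw [hl1]; omega) (by omega) (by omega)]
  -- assemble the pieces
  have hlt : ((array.take s.toNat).reverse).length = s.toNat := by simp; omega
  have ht : (((array.take s.toNat).reverse ++ array.drop s.toNat).take s.toNat)
      = (array.take s.toNat).reverse := List.take_left' hlt
  have hd : (((array.take s.toNat).reverse ++ array.drop s.toNat).drop s.toNat)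
      = array.drop s.toNat := List.drop_left' hlt
  rw [ht, hd]
  have htk : (array.drop s.toNat).take (array.length - s.toNat) = array.drop s.toNat :=
    List.take_of_length_le (by simp)
  have hz : List.drop (s.toNat + (array.length - s.toNat))
      ((List.take s.toNat array).reverse ++ List.drop s.toNat array) = [] :=
    List.drop_eq_nil_of_le (by rw [hl1]; omega)
  rw [htk, hz]
  simp
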